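-- pv_equiv track=rewrite | github.com/iatoolkit/iatoolkit | src/iatoolkit/services/memory_service.py | _capture_preview
-- ===== SOURCE A (Python) =====
-- def _capture_preview(items: list[dict]) -> str:
--     if not items:
--         return ""
--     priority = ["note", "chat_user_message", "chat_assistant_message", "link", "image", "file"]
--     for item_type in priority:
--         candidate = next((item for item in items if item.get("item_type") == item_type), None)
--         if candidate:
--             return (
--                 candidate.get("content_preview")
--                 or candidate.get("title")
--                 or candidate.get("filename")
--                 or candidate.get("source_url")
--                 or ""
--             )
--     candidate = items[0]
--     return (
--         candidate.get("content_preview")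
--         or candidate.get("title")
--         or candidate.get("filename")
--         or candidate.get("source_url")
--         or ""
--     )
-- ===== SOURCE B (Python) =====
-- def _capture_preview(items: list[dict]) -> str:
--     if not items:
--         return ""
--     rank = {"note": 0, "chat_user_message": 1, "chat_assistant_message": 2,
--             "link": 3, "image": 4, "file": 5}
--     best = items[0]
--     best_rank = 6
--     for item in items:
--         r = rank.get(item.get("item_type"), 6)
--         if r < best_rank:
--             best, best_rank = item, r
--     for key in ("content_preview", "title", "filename", "source_url"):
--         value = best.get(key)
--         if value:
--             return value
--     return ""
-- ===== Notes on version B (the rewrite author's own statement) =====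
-- stated objective: alternative
-- what changed: B replaces A's priority-ordered repeated searches (one scan of items per priority type) by a single-pass argmin selection: each item is mapped to a numeric rank via a rank table and a one-pass strict-min fold keeps the first item of lowest rank (items[0] if nothing ranks), then the or-chain becomes a key loop.
import Mathlib
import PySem

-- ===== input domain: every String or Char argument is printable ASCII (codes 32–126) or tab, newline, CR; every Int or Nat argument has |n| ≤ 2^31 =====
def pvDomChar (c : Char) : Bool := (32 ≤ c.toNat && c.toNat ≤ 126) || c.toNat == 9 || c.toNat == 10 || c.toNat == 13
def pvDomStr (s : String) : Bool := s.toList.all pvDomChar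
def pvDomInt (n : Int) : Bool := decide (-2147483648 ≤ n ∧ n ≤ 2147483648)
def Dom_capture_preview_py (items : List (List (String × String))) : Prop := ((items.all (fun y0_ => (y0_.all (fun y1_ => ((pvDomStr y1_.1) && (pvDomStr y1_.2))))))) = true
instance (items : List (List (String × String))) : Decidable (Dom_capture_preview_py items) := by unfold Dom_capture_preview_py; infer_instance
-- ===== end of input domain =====

-- B replaces A's priority-ordered repeated searches (one scan per priority type) by a single-pass
-- argmin selection over numeric ranks (alternative decomposition; same results).

-- dict.get(k): first match in the association list (Python dicts have unique keys; convention: first match)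
def pvDGet (d : List (String × String)) (k : String) : Option String :=
  (d.find? (fun p => p.1 == k)).map (·.2)

-- ===== PORT A =====
-- `x or y` for x : Optional[str] (falsy = None or "")
def pvOrStr (x : Option String) (y : String) : String :=
  match x with
  | some s => if s = "" then y else s
  | none => y

-- the for-loop over `priority`; `first` is items[0] (used by the fallback return after the loop)
def pvAScan (items : List (List (String × String))) (first : List (String × String)) :
    List String → String
  | [] =>
      pvOrStr (pvDGet first "content_preview") (pvOrStr (pvDGet first "title")
        (pvOrStr (pvDGet first "filename") (pvOrStr (pvDGet first "source_url") "")))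
  | t :: rest =>
      match items.find? (fun it => pvDGet it "item_type" == some t) with
      | some c =>
          -- `if candidate:` — a dict is truthy iff nonempty
          if c.isEmpty then pvAScan items first rest
          else
            pvOrStr (pvDGet c "content_preview") (pvOrStr (pvDGet c "title")
              (pvOrStr (pvDGet c "filename") (pvOrStr (pvDGet c "source_url") "")))
      | none => pvAScan items first rest

def capture_preview_py (items : List (List (String × String))) : String :=
  match items with
  | [] => ""
  | first :: _ =>
      pvAScan items first
        ["note", "chat_user_message", "chat_assistant_message", "link", "image", "file"]

-- ===== PORT B =====
-- rank.get(x, 6): first-match lookup in Source B's literal `rank` dict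
-- ({"note":0, "chat_user_message":1, "chat_assistant_message":2, "link":3, "image":4, "file":5});
-- a None key (item has no "item_type") is absent from rank, hence the default 6
def pvRankOf : Option String → Int
  | none => 6
  | some s =>
      if s = "note" then 0
      else if s = "chat_user_message" then 1
      else if s = "chat_assistant_message" then 2
      else if s = "link" then 3
      else if s = "image" then 4
      else if s = "file" then 5
      else 6

-- one iteration of Source B's selection loop
def pvStep (acc : List (String × String) × Int) (it : List (String × String)) :
    List (String × String) × Int :=
  let r := pvRankOf (pvDGet it "item_type")
  if r < acc.2 then (it, r) else acc

-- Source B's trailing key loop: first truthy value among the four keys, else ""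
def pvBPreview (it : List (String × String)) : String :=
  match ["content_preview", "title", "filename", "source_url"].findSome?
      (fun k => match pvDGet it k with
                | some v => if v = "" then none else some v
                | none => none) with
  | some v => v
  | none => ""

def capture_preview_py_alt (items : List (List (String × String))) : String :=
  match items with
  | [] => ""
  | first :: _ =>
      let best := items.foldl pvStep (first, 6)
      pvBPreview best.1

-- ===== PRECONDITION & SPEC =====
def Spec_capture_preview_py (items : List (List (String × String))) (out : String) : Prop := out = capture_preview_py_alt items
instance (items : List (List (String × String))) (out : String) : Decidable (Spec_capture_preview_py items out) := by unfold Spec_capture_preview_py; infer_instance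

-- ===== CLAIM (what is proved, stated in full; the proofs are below) =====
def Claim_equal_capture_preview_py : Prop := ∀ (items : List (List (String × String))), Dom_capture_preview_py items → Spec_capture_preview_py items (capture_preview_py items)

-- ===== LEMMAS AND PROOFS =====

-- an item's rank (proof-only abbreviation)
def pvPr (it : List (String × String)) : Int := pvRankOf (pvDGet it "item_type")

theorem pv_pr_nonneg (it : List (String × String)) : 0 ≤ pvPr it := by
  unfold pvPr
  cases pvDGet it "item_type" with
  | none => norm_num [pvRankOf]
  | some s =>
      simp only [pvRankOf]
      split_ifs <;> norm_num

-- once the accumulator's rank is a lower bound of all remaining ranks, the fold is constant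
theorem pv_fold_stay (l : List (List (String × String))) (b : List (String × String)) (rb : Int)
    (h : ∀ it ∈ l, rb ≤ pvPr it) : l.foldl pvStep (b, rb) = (b, rb) := by
  induction l with
  | nil => rfl
  | cons it l ih =>
      have h1 := h it (by simp)
      have : pvStep (b, rb) it = (b, rb) := by
        unfold pvStep
        have : ¬ pvRankOf (pvDGet it "item_type") < rb := by
          have : pvPr it = pvRankOf (pvDGet it "item_type") := rfl
          omega
        simp [this]
      rw [List.foldl_cons, this]
      exact ih (fun x hx => h x (by simp [hx]))

-- if c is the FIRST element of rank m and m is a strict lower bound, the fold returns (c, m)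
theorem pv_fold_first_min (l : List (List (String × String))) (b : List (String × String))
    (rb m : Int) (c : List (String × String))
    (hf : l.find? (fun it => pvPr it == m) = some c)
    (hlb : ∀ it ∈ l, m ≤ pvPr it) (hm : m < rb) :
    l.foldl pvStep (b, rb) = (c, m) := by
  induction l generalizing b rb with
  | nil => simp at hf
  | cons it l ih =>
      by_cases hq : (pvPr it == m) = true
      · have hc : it = c := by
          simp only [List.find?, hq] at hf; exact Option.some.inj hf
        have hpm : pvPr it = m := by simpa using hq
        subst hc
        have hstep : pvStep (b, rb) it = (it, m) := by
          unfold pvStep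
          have : pvRankOf (pvDGet it "item_type") = m := hpm
          simp [this, hm]
        rw [List.foldl_cons, hstep]
        exact pv_fold_stay l it m (fun x hx => hlb x (by simp [hx]))
      · have hqf : (pvPr it == m) = false := by simpa using hq
        simp only [List.find?, hqf] at hf
        have hne : pvPr it ≠ m := by simpa using hq
        have hge : m ≤ pvPr it := hlb it (by simp)
        have hlb' : ∀ x ∈ l, m ≤ pvPr x := fun x hx => hlb x (by simp [hx])
        rw [List.foldl_cons]
        by_cases hlt : pvRankOf (pvDGet it "item_type") < rb
        · have hstep : pvStep (b, rb) it = (it, pvRankOf (pvDGet it "item_type")) := by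
            unfold pvStep; simp [hlt]
          rw [hstep]
          have hm' : m < pvPr it := by omega
          exact ih _ _ hf hlb' hm'
        · have hstep : pvStep (b, rb) it = (b, rb) := by
            unfold pvStep; simp [hlt]
          rw [hstep]
          exact ih _ _ hf hlb' hm

-- the four-key or-chain of A equals Source B's key loop
theorem pv_preview_eq (it : List (String × String)) :
    pvOrStr (pvDGet it "content_preview") (pvOrStr (pvDGet it "title")
      (pvOrStr (pvDGet it "filename") (pvOrStr (pvDGet it "source_url") "")))
    = pvBPreview it := by
  unfold pvBPreview
  cases h1 : pvDGet it "content_preview" <;>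
    cases h2 : pvDGet it "title" <;>
      cases h3 : pvDGet it "filename" <;>
        cases h4 : pvDGet it "source_url" <;>
          simp [pvOrStr, List.findSome?, h1, h2, h3, h4] <;> split_ifs <;> simp_all

-- matching a given priority type is the same test as having its rank (one lemma per type)
theorem pv_rank0 (o : Option String) : (o == some "note") = (pvRankOf o == (0:Int)) := by
  cases o with
  | none => simp [pvRankOf]
  | some s =>
      by_cases h : s = "note"
      · simp [pvRankOf, h]
      · simp only [pvRankOf]
        split_ifs <;> simp_all

theorem pv_rank1 (o : Option String) : (o == some "chat_user_message") = (pvRankOf o == (1:Int)) := by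
  cases o with
  | none => simp [pvRankOf]
  | some s =>
      by_cases h : s = "chat_user_message"
      · simp [pvRankOf, h]
      · simp only [pvRankOf]
        split_ifs <;> simp_all

theorem pv_rank2 (o : Option String) : (o == some "chat_assistant_message") = (pvRankOf o == (2:Int)) := by
  cases o with
  | none => simp [pvRankOf]
  | some s =>
      by_cases h : s = "chat_assistant_message"
      · simp [pvRankOf, h]
      · simp only [pvRankOf]
        split_ifs <;> simp_all

theorem pv_rank3 (o : Option String) : (o == some "link") = (pvRankOf o == (3:Int)) := by
  cases o with
  | none => simp [pvRankOf]
  | some s =>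
      by_cases h : s = "link"
      · simp [pvRankOf, h]
      · simp only [pvRankOf]
        split_ifs <;> simp_all

theorem pv_rank4 (o : Option String) : (o == some "image") = (pvRankOf o == (4:Int)) := by
  cases o with
  | none => simp [pvRankOf]
  | some s =>
      by_cases h : s = "image"
      · simp [pvRankOf, h]
      · simp only [pvRankOf]
        split_ifs <;> simp_all

theorem pv_rank5 (o : Option String) : (o == some "file") = (pvRankOf o == (5:Int)) := by
  cases o with
  | none => simp [pvRankOf]
  | some s =>
      by_cases h : s = "file"
      · simp [pvRankOf, h]
      · simp only [pvRankOf]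
        split_ifs <;> simp_all

-- one step of A's priority loop, abstracted: either the found item is the argmin, or recurse
theorem pv_scan_cons (items : List (List (String × String))) (first : List (String × String))
    (t : String) (rest : List String) (m : Int)
    (hpred : ∀ o : Option String, (o == some t) = (pvRankOf o == m))
    (hlb : ∀ it ∈ items, m ≤ pvPr it) (hm : m < 6) :
    pvAScan items first (t :: rest)
      = match items.find? (fun it => pvPr it == m) with
        | some _ => pvBPreview (items.foldl pvStep (first, 6)).1
        | none => pvAScan items first rest := by
  have hfind : items.find? (fun it => pvDGet it "item_type" == some t)
      = items.find? (fun it => pvPr it == m) := by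
    congr 1; funext it; exact hpred (pvDGet it "item_type")
  rw [pvAScan, hfind]
  cases hf : items.find? (fun it => pvPr it == m) with
  | none => simp
  | some c =>
      have hq : (pvPr c == m) = true := by
        have := List.find?_some hf; simpa using this
      have htype : (pvDGet c "item_type" == some t) = true := by rw [hpred]; exact hq
      have hty : pvDGet c "item_type" = some t := by simpa using htype
      have hne : c.isEmpty = false := by
        cases c with
        | nil => simp [pvDGet] at hty
        | cons p ps => rfl
      have hfold : items.foldl pvStep (first, 6) = (c, m) :=
        pv_fold_first_min items first 6 m c hf hlb hm
      simp only [hne, Bool.false_eq_true, if_false, hfold]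
      exact pv_preview_eq c

-- the whole priority loop equals the one-pass argmin selection
theorem pv_scan_min (items : List (List (String × String))) (first : List (String × String)) :
    pvAScan items first
        ["note", "chat_user_message", "chat_assistant_message", "link", "image", "file"]
      = pvBPreview (items.foldl pvStep (first, 6)).1 := by
  have h0 : ∀ it ∈ items, (0:Int) ≤ pvPr it := fun it _ => pv_pr_nonneg it
  rw [pv_scan_cons items first _ _ 0 pv_rank0 h0 (by norm_num)]
  cases hf0 : items.find? (fun it => pvPr it == (0:Int)) with
  | some c => rfl
  | none =>
    have h1 : ∀ it ∈ items, (1:Int) ≤ pvPr it := by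
      intro it hit
      have := List.find?_eq_none.mp hf0 it hit
      have := h0 it hit
      simp only [beq_iff_eq] at *
      omega
    rw [pv_scan_cons items first _ _ 1 pv_rank1 h1 (by norm_num)]
    cases hf1 : items.find? (fun it => pvPr it == (1:Int)) with
    | some c => rfl
    | none =>
      have h2 : ∀ it ∈ items, (2:Int) ≤ pvPr it := by
        intro it hit
        have := List.find?_eq_none.mp hf1 it hit
        have := h1 it hit
        simp only [beq_iff_eq] at *
        omega
      rw [pv_scan_cons items first _ _ 2 pv_rank2 h2 (by norm_num)]
      cases hf2 : items.find? (fun it => pvPr it == (2:Int)) with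
      | some c => rfl
      | none =>
        have h3 : ∀ it ∈ items, (3:Int) ≤ pvPr it := by
          intro it hit
          have := List.find?_eq_none.mp hf2 it hit
          have := h2 it hit
          simp only [beq_iff_eq] at *
          omega
        rw [pv_scan_cons items first _ _ 3 pv_rank3 h3 (by norm_num)]
        cases hf3 : items.find? (fun it => pvPr it == (3:Int)) with
        | some c => rfl
        | none =>
          have h4 : ∀ it ∈ items, (4:Int) ≤ pvPr it := by
            intro it hit
            have := List.find?_eq_none.mp hf3 it hit
            have := h3 it hit
            simp only [beq_iff_eq] at *
            omega
          rw [pv_scan_cons items first _ _ 4 pv_rank4 h4 (by norm_num)]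
          cases hf4 : items.find? (fun it => pvPr it == (4:Int)) with
          | some c => rfl
          | none =>
            have h5 : ∀ it ∈ items, (5:Int) ≤ pvPr it := by
              intro it hit
              have := List.find?_eq_none.mp hf4 it hit
              have := h4 it hit
              simp only [beq_iff_eq] at *
              omega
            rw [pv_scan_cons items first _ _ 5 pv_rank5 h5 (by norm_num)]
            cases hf5 : items.find? (fun it => pvPr it == (5:Int)) with
            | some c => rfl
            | none =>
              have h6 : ∀ it ∈ items, (6:Int) ≤ pvPr it := by
                intro it hit
                have := List.find?_eq_none.mp hf5 it hit
                have := h5 it hit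
                simp only [beq_iff_eq] at *
                omega
              have hfold : items.foldl pvStep (first, 6) = (first, 6) :=
                pv_fold_stay items first 6 h6
              rw [pvAScan, hfold]
              exact pv_preview_eq first

-- ===== VERDICT (by name: the statement is the Claim_ definition above) =====
theorem capture_preview_py_spec : Claim_equal_capture_preview_py := by
  intro items _
  unfold Spec_capture_preview_py capture_preview_py capture_preview_py_alt
  cases items with
  | nil => rfl
  | cons first rest => exact pv_scan_min (first :: rest) first
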